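-- pv_equiv track=rewrite | github.com/congman5/Euclid | verifier/t_consequence.py | _unify_args
-- ===== SOURCE A (Python) =====
-- from typing import Dict, List, Optional, Set, Tuple
--
-- def _unify_args(
--     schema: Tuple[str, ...], concrete: Tuple[str, ...]
-- ) -> Optional[Dict[str, str]]:
--     """Try to unify schema args with concrete args.
--
--     Returns a substitution dict if consistent, None if conflict.
--     """
--     sub: Dict[str, str] = {}
--     for svar, cval in zip(schema, concrete):
--         if svar in sub:
--             if sub[svar] != cval:
--                 return None
--         else:
--             sub[svar] = cval
--     return sub
-- ===== SOURCE B (Python) =====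
-- from typing import Dict, List, Optional, Set, Tuple
--
-- def _unify_args(
--     schema: Tuple[str, ...], concrete: Tuple[str, ...]
-- ) -> Optional[Dict[str, str]]:
--     """Group then validate: one pass builds svar -> set of concrete values,
--     a second pass rejects any svar bound to two values and otherwise
--     extracts the unique binding (first-occurrence key order)."""
--     groups: Dict[str, Set[str]] = {}
--     for svar, cval in zip(schema, concrete):
--         groups.setdefault(svar, set()).add(cval)
--     if any(len(vals) > 1 for vals in groups.values()):
--         return None
--     return {svar: next(iter(vals)) for svar, vals in groups.items()}
-- ===== Notes on version B (the rewrite author's own statement) =====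
-- stated objective: alternative
-- what changed: Replaces the incremental scan with early conflict exit by an index-build-then-validate shape: one pass groups each schema var's concrete values into a dict of sets, a second pass rejects multi-valued vars and extracts the substitution.
import Mathlib
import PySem

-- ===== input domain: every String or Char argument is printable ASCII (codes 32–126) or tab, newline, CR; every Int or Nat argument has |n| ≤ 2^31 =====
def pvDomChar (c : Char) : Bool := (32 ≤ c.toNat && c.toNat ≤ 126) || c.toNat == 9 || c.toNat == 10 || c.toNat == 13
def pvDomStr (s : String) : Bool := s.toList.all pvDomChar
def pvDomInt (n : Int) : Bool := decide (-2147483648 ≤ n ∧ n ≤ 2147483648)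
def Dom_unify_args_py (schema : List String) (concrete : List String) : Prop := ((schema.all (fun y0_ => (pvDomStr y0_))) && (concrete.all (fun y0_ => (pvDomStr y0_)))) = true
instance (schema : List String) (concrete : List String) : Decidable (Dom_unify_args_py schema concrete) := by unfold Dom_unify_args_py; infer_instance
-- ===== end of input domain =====

-- B replaces A's incremental scan-with-early-exit by a build-groups-then-validate decomposition (objective: alternative, same cost).


-- ===== PORT A =====
-- for svar, cval in zip(schema, concrete): early None on conflict, else extend sub
def pvLoopA : List (String × String) → PySem.Dict String String → Option (PySem.Dict String String)
  | [], sub => some sub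
  | (svar, cval) :: rest, sub =>
    if sub.contains svar then
      if sub.getD svar "" ≠ cval then none   -- sub[svar] != cval (key present, so getD is exact)
      else pvLoopA rest sub
    else pvLoopA rest (sub.insert svar cval)

def unify_args_py (schema : List String) (concrete : List String) : Option (List (String × String)) :=
  (pvLoopA (schema.zip concrete) PySem.Dict.empty).map PySem.Dict.items

-- ===== PORT B =====
-- groups.setdefault(svar, set()).add(cval)  ==  groups[svar] = groups.get(svar, set()) ∪ {cval}  ==  Dict.modify
def pvGroupsB (pairs : List (String × String)) : PySem.Dict String (PySem.Set String) :=
  pairs.foldl (fun d p => d.modify p.1 PySem.Set.empty (fun s => PySem.Set.add s p.2)) PySem.Dict.empty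

-- if any(len(vals) > 1 ...): None; else {svar: next(iter(vals)) ...}.
-- next(iter(vals)) is only reached when vals is a singleton set, where it is its unique element: headD "" is exact there.
def pvFinishB (groups : PySem.Dict String (PySem.Set String)) : Option (List (String × String)) :=
  if groups.items.any (fun kv => 1 < PySem.Set.len kv.2) then none
  else some (groups.items.map (fun kv => (kv.1, kv.2.headD "")))

def unify_args_py_alt (schema : List String) (concrete : List String) : Option (List (String × String)) :=
  pvFinishB (pvGroupsB (schema.zip concrete))

-- ===== PRECONDITION & SPEC =====
def Spec_unify_args_py (schema : List String) (concrete : List String) (out : Option (List (String × String))) : Prop := out = unify_args_py_alt schema concrete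
instance (schema : List String) (concrete : List String) (out : Option (List (String × String))) : Decidable (Spec_unify_args_py schema concrete out) := by unfold Spec_unify_args_py; infer_instance

-- ===== CLAIM (what is proved, stated in full; the proofs are below) =====
def Claim_equal_unify_args_py : Prop := ∀ (schema : List String) (concrete : List String), Dom_unify_args_py schema concrete → Spec_unify_args_py schema concrete (unify_args_py schema concrete)

-- ===== LEMMAS AND PROOFS =====

lemma pvPoison (pairs : List (String × String)) (groups : PySem.Dict String (PySem.Set String))
    (k : String) (s : PySem.Set String) (h : groups.get? k = some s) (hlen : 1 < s.length) :
    pvFinishB (pairs.foldl (fun d p => d.modify p.1 PySem.Set.empty (fun s => PySem.Set.add s p.2)) groups) = none := by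
  induction pairs generalizing groups k s with
  | nil =>
    have hmem := PySem.Dict.mem_items_of_get?_eq_some groups h
    simp only [List.foldl_nil, pvFinishB]
    rw [if_pos]
    rw [List.any_eq_true]
    exact ⟨(k, s), hmem, by simp [PySem.Set.len]; exact_mod_cast hlen⟩
  | cons p rest ih =>
    simp only [List.foldl_cons]
    by_cases hk : k = p.1
    · subst hk
      apply ih _ p.1 (PySem.Set.add s p.2)
      · simp only [PySem.Dict.modify]
        rw [PySem.Dict.get?_insert_self]
        congr 1
        rw [PySem.Dict.getD_eq_get?_getD, h]
        rfl
      · unfold PySem.Set.add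
        split
        · exact hlen
        · simp; omega
    · apply ih _ k s _ hlen
      simp only [PySem.Dict.modify]
      rw [PySem.Dict.get?_insert_of_ne _ _ hk, h]

-- loop invariant: groups is sub with every value wrapped as a singleton set
lemma pvKey (pairs : List (String × String)) (sub : PySem.Dict String String)
    (groups : PySem.Dict String (PySem.Set String))
    (hnd : sub.keys.Nodup)
    (hinv : groups.items = sub.items.map (fun kv => (kv.1, [kv.2]))) :
    (pvLoopA pairs sub).map PySem.Dict.items
      = pvFinishB (pairs.foldl (fun d p => d.modify p.1 PySem.Set.empty (fun s => PySem.Set.add s p.2)) groups) := by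
  induction pairs generalizing sub groups with
  | nil =>
    simp only [pvLoopA, List.foldl_nil, Option.map_some, pvFinishB]
    rw [if_neg]
    · rw [hinv]
      simp [List.map_map, Function.comp_def]
    · rw [hinv]
      simp [List.any_map, Function.comp, PySem.Set.len]
  | cons p rest ih =>
    obtain ⟨k, v⟩ := p
    have hkeys : groups.keys = sub.keys := by
      simp [PySem.Dict.keys, hinv, List.map_map, Function.comp]
    have hgnd : groups.keys.Nodup := by rw [hkeys]; exact hnd
    have hcc : groups.contains k = sub.contains k := by
      rw [PySem.Dict.contains_eq_decide_mem_keys, PySem.Dict.contains_eq_decide_mem_keys, hkeys]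
    simp only [List.foldl_cons, pvLoopA]
    by_cases hsc : sub.contains k = true
    · -- key already bound
      have hsome : (sub.get? k).isSome := by
        rw [← PySem.Dict.contains_eq_isSome_get?]; exact hsc
      obtain ⟨w, hw⟩ := Option.isSome_iff_exists.mp hsome
      have hmemw : (k, w) ∈ sub.items := PySem.Dict.mem_items_of_get?_eq_some sub hw
      have hmemg : (k, [w]) ∈ groups.items := by
        rw [hinv]
        exact List.mem_map.mpr ⟨(k, w), hmemw, rfl⟩
      have hgw : groups.get? k = some [w] := PySem.Dict.get?_of_mem_items groups hmemg hgnd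
      have hgetd : sub.getD k "" = w := by rw [PySem.Dict.getD_eq_get?_getD, hw]; rfl
      have hggetd : groups.getD k PySem.Set.empty = [w] := by
        rw [PySem.Dict.getD_eq_get?_getD, hgw]; rfl
      rw [if_pos hsc, hgetd]
      simp only [PySem.Dict.modify, hggetd]
      by_cases hv : w = v
      · -- consistent binding: groups entry unchanged
        subst hv
        rw [if_neg (by simp)]
        have hadd : PySem.Set.add [w] w = [w] := by
          simp [PySem.Set.add, PySem.Set.contains]
        rw [hadd]
        apply ih sub _ hnd
        rw [PySem.Dict.items_insert_of_contains groups _ (by rw [hcc]; exact hsc)]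
        rw [← hinv]
        have hcongr : ∀ q ∈ groups.items,
            (if q.1 == k then ((k : String), ([w] : PySem.Set String)) else q) = q := by
          intro q hq
          split
          · next heq =>
            have hq1 : q.1 = k := by exact beq_iff_eq.mp heq
            have : groups.get? q.1 = some q.2 := PySem.Dict.get?_of_mem_items groups hq hgnd
            rw [hq1, hgw] at this
            have hq2 : q.2 = [w] := by injection this.symm
            rw [← hq1, ← hq2]
          · rfl
        rw [List.map_congr_left hcongr]
        simp
      · -- conflict: A returns none, B's group at k now has two elements
        rw [if_pos hv]
        have hadd : PySem.Set.add [w] v = [w, v] := by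
          simp only [PySem.Set.add, PySem.Set.contains]
          rw [if_neg]
          · rfl
          · intro h
            simp only [List.contains_cons, List.contains_nil, Bool.or_false, beq_iff_eq] at h
            exact hv h.symm
        rw [hadd]
        symm
        simp only [Option.map_none]
        exact pvPoison rest _ k [w, v] (PySem.Dict.get?_insert_self _ _ _) (by simp)
    · -- fresh key
      rw [if_neg hsc]
      have hgc : groups.contains k = false := by rw [hcc]; exact eq_false_of_ne_true hsc
      have hggetd : groups.getD k PySem.Set.empty = PySem.Set.empty :=
        PySem.Dict.getD_of_not_contains groups PySem.Set.empty hgc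
      simp only [PySem.Dict.modify, hggetd]
      have hadd : PySem.Set.add PySem.Set.empty v = [v] := by
        simp [PySem.Set.add, PySem.Set.contains, PySem.Set.empty]
      rw [hadd]
      apply ih (sub.insert k v) _ (PySem.Dict.nodup_keys_insert sub k v hnd)
      rw [PySem.Dict.items_insert_of_not_contains groups _ hgc,
          PySem.Dict.items_insert_of_not_contains sub _ (eq_false_of_ne_true hsc), List.map_append, hinv]
      rfl

-- ===== VERDICT (by name: the statement is the Claim_ definition above) =====
theorem unify_args_py_spec : Claim_equal_unify_args_py := by
  intro schema concrete _
  unfold Spec_unify_args_py unify_args_py unify_args_py_alt pvGroupsB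
  exact pvKey (schema.zip concrete) PySem.Dict.empty PySem.Dict.empty (by decide) (by decide)
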